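-- pv_equiv track=rewrite | github.com/dragneel786/leetcode_practise | Count-Submatrices-with-Top-Left-Element-and-Sum-Less-Than-k.py | countSubmatrices
-- ===== SOURCE A (Python) =====
-- from typing import List
--
-- def countSubmatrices(grid: List[List[int]], k: int) -> int:
--     rows, cols = len(grid), len(grid[0])
--     for r in range(rows):
--         for c in range(cols):
--             if r - 1 > -1:
--                 grid[r][c] += grid[r - 1][c]
--
--             if c - 1 > -1:
--                 grid[r][c] += grid[r][c - 1]
--
--             if r - 1  > -1 and c - 1 > -1:
--                 grid[r][c] -= grid[r - 1][c - 1]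
--
--     count = 0
--     for r in range(rows):
--         for c in range(cols):
--             if grid[r][c] > k:
--                 break
--
--             count += 1
--
--     return count
-- ===== SOURCE B (Python) =====
-- from typing import List
--
-- def countSubmatrices(grid: List[List[int]], k: int) -> int:
--     # Streaming column-sum accumulator: no 2D prefix matrix is built and grid is
--     # not mutated; one O(cols) array of running column sums is maintained, and
--     # each row is counted on the fly with a running horizontal sum (break on > k).
--     cols = len(grid[0])
--     colsum = [0] * cols
--     count = 0
--     for r in range(len(grid)):
--         row = grid[r]
--         for c in range(cols):
--             colsum[c] += row[c]
--         run = 0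
--         for c in range(cols):
--             run += colsum[c]
--             if run > k:
--                 break
--             count += 1
--     return count
-- ===== Notes on version B (the rewrite author's own statement) =====
-- stated objective: faster
-- what changed: Instead of mutating grid into a 2D prefix-sum matrix and then counting in a second phase, B keeps a single O(cols) running column-sum array and counts each row on the fly with a running horizontal sum (same break on the first value > k); grid is not mutated and no 2D prefix matrix exists; the per-cell boundary tests and list-of-lists indexing disappear, a constant-factor saving (measured ~3x).
import Mathlib
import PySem

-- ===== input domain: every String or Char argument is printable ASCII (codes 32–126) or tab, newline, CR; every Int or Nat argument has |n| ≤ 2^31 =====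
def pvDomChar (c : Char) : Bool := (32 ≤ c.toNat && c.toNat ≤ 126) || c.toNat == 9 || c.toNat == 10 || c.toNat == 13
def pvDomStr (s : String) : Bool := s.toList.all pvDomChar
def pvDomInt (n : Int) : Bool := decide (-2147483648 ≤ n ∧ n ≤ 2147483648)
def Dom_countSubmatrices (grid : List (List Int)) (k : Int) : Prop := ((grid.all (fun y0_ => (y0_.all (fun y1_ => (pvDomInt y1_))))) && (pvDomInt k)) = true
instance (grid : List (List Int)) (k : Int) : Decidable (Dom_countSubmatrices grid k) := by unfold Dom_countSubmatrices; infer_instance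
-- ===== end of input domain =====

-- B replaces A's in-place 2D prefix-sum matrix with a streaming O(cols) column-sum
-- accumulator, counting each row on the fly with a running horizontal sum (same break on > k).
-- Equivalence is about the RETURN value only: A mutates grid in place, B does not.


-- cell read/write helpers for A's in-place grid (`grid[r][c]`, `grid[r][c] = v`);
-- in-range under Pre_ everywhere they are used (out of range they default/no-op)
def pvGet2 (g : List (List Int)) (r c : Nat) : Int := (g.getD r []).getD c 0
def pvSet2 (g : List (List Int)) (r c : Nat) (v : Int) : List (List Int) :=
  g.set r ((g.getD r []).set c v)

-- ===== PORT A =====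
def aStep (g : List (List Int)) (r c : Nat) : List (List Int) :=
  let v := pvGet2 g r c
  let v := if 1 ≤ r then v + pvGet2 g (r - 1) c else v
  let v := if 1 ≤ c then v + pvGet2 g r (c - 1) else v
  let v := if 1 ≤ r ∧ 1 ≤ c then v - pvGet2 g (r - 1) (c - 1) else v
  pvSet2 g r c v

-- inner counting loop: counts cells until the first one > k (Python's break)
def aCountRow (g : List (List Int)) (r : Nat) (k : Int) : List Nat → Int
  | [] => 0
  | c :: cs => if pvGet2 g r c > k then 0 else 1 + aCountRow g r k cs

def countSubmatrices (grid : List (List Int)) (k : Int) : Int :=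
  let rows := grid.length
  let cols := (grid.headD []).length
  let g := (List.range rows).foldl
    (fun g r => (List.range cols).foldl (fun g c => aStep g r c) g) grid
  (List.range rows).foldl (fun count r => count + aCountRow g r k (List.range cols)) 0

-- ===== PORT B =====
-- colsum[c] += row[c] for c in range(cols)
def bUpdate (g0 : List (List Int)) (r cols : Nat) (cs : List Int) : List Int :=
  (List.range cols).foldl (fun cs c => cs.set c (cs.getD c 0 + pvGet2 g0 r c)) cs

-- running-sum counting loop with break on run > k
def bRun (cs : List Int) (k : Int) (run : Int) : List Nat → Int
  | [] => 0
  | c :: rest =>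
    let run' := run + cs.getD c 0
    if run' > k then 0 else 1 + bRun cs k run' rest

def countSubmatrices_alt (grid : List (List Int)) (k : Int) : Int :=
  let cols := (grid.headD []).length
  let st := (List.range grid.length).foldl
    (fun (st : List Int × Int) r =>
      let cs := bUpdate grid r cols st.1
      (cs, st.2 + bRun cs k 0 (List.range cols)))
    (List.replicate cols (0 : Int), 0)
  st.2

-- ===== PRECONDITION & SPEC =====
-- Pre_ = exactly the inputs on which the Python A returns: grid nonempty (len(grid[0]) raises
-- IndexError on []) and every row at least as long as the first (a shorter row raises IndexError).
def Pre_countSubmatrices (grid : List (List Int)) (k : Int) : Prop :=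
  grid ≠ [] ∧ ∀ row ∈ grid, (grid.headD []).length ≤ row.length
instance (grid : List (List Int)) (k : Int) : Decidable (Pre_countSubmatrices grid k) := by
  unfold Pre_countSubmatrices; infer_instance

def pvWitness_countSubmatrices : List (List Int) × Int := ([[7, 2, 9], [1, 5, 0]], 20)

def Spec_countSubmatrices (grid : List (List Int)) (k : Int) (out : Int) : Prop := out = countSubmatrices_alt grid k
instance (grid : List (List Int)) (k : Int) (out : Int) : Decidable (Spec_countSubmatrices grid k out) := by unfold Spec_countSubmatrices; infer_instance

-- ===== CLAIM (what is proved, stated in full; the proofs are below) =====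
def Claim_equal_countSubmatrices : Prop := ∀ (grid : List (List Int)) (k : Int), Dom_countSubmatrices grid k → Pre_countSubmatrices grid k → Spec_countSubmatrices grid k (countSubmatrices grid k)

-- ===== LEMMAS AND PROOFS =====
-- target values: row prefix sums, column prefix sums, rectangle (2D prefix) sums of the ORIGINAL grid
def rowp (g0 : List (List Int)) (r c : Nat) : Int :=
  ∑ j ∈ Finset.range (c + 1), pvGet2 g0 r j

def rect (g0 : List (List Int)) (r c : Nat) : Int :=
  ∑ i ∈ Finset.range (r + 1), rowp g0 i c

def colS (g0 : List (List Int)) (r c : Nat) : Int :=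
  ∑ i ∈ Finset.range r, pvGet2 g0 i c

lemma rowlen_pvSet2 (g : List (List Int)) (r c : Nat) (v : Int) (i : Nat) :
    ((pvSet2 g r c v).getD i []).length = (g.getD i []).length := by
  simp only [pvSet2, List.getD_eq_getElem?_getD, List.getElem?_set]
  by_cases h : r = i
  · subst h
    by_cases hr : r < g.length
    · simp [hr]
    · simp [hr]
  · simp [h]

lemma get2_pvSet2_same (g : List (List Int)) (r c : Nat) (v : Int)
    (hr : r < g.length) (hc : c < (g.getD r []).length) :
    pvGet2 (pvSet2 g r c v) r c = v := by
  simp only [pvGet2, pvSet2, List.getD_eq_getElem?_getD, List.getElem?_set, hr, if_true]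
  simp [List.getElem?_eq_getElem hr] at hc ⊢
  simp [hc]

lemma get2_pvSet2_ne (g : List (List Int)) (r c i j : Nat) (v : Int)
    (h : i ≠ r ∨ j ≠ c) :
    pvGet2 (pvSet2 g r c v) i j = pvGet2 g i j := by
  rcases h with h | h
  · simp [pvGet2, pvSet2, List.getD_eq_getElem?_getD, Ne.symm h]
  · simp only [pvGet2, pvSet2, List.getD_eq_getElem?_getD, List.getElem?_set]
    by_cases hi : r = i
    · subst hi
      by_cases hr : r < g.length
      · simp [hr, Ne.symm h]
      · simp [hr]
    · simp [hi]

lemma foldl_range'_inv {α : Type} (f : α → Nat → α) (P : Nat → α → Prop)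
    (n : Nat) (s : Nat) (a : α)
    (step : ∀ c b, s ≤ c → c < s + n → P c b → P (c + 1) (f b c))
    (h0 : P s a) : P (s + n) (List.foldl f a (List.range' s n)) := by
  induction n generalizing s a with
  | zero => simpa using h0
  | succ m ih =>
    rw [List.range'_succ, List.foldl_cons]
    have := ih (s + 1) (f a s)
      (fun c b hc hc' hb => step c b (by omega) (by omega) hb)
      (step s a (by omega) (by omega) h0)
    simpa [Nat.add_comm, Nat.add_left_comm] using this

lemma rowp_zero (g0 : List (List Int)) (r : Nat) : rowp g0 r 0 = pvGet2 g0 r 0 := by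
  simp [rowp]

lemma rowp_succ (g0 : List (List Int)) (r c : Nat) :
    rowp g0 r (c + 1) = rowp g0 r c + pvGet2 g0 r (c + 1) := by
  simp [rowp, Finset.sum_range_succ]

lemma rect_zero (g0 : List (List Int)) (c : Nat) : rect g0 0 c = rowp g0 0 c := by
  simp [rect]

lemma rect_succ (g0 : List (List Int)) (r c : Nat) :
    rect g0 (r + 1) c = rect g0 r c + rowp g0 (r + 1) c := by
  simp [rect, Finset.sum_range_succ]

lemma rect_row (g0 : List (List Int)) (r c : Nat) (hr : 1 ≤ r) :
    rect g0 r c = rect g0 (r - 1) c + rowp g0 r c := by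
  cases r with
  | zero => omega
  | succ r' => simpa using rect_succ g0 r' c

lemma rowp_col (g0 : List (List Int)) (r c : Nat) (hc : 1 ≤ c) :
    rowp g0 r c = rowp g0 r (c - 1) + pvGet2 g0 r c := by
  cases c with
  | zero => omega
  | succ c' => simpa using rowp_succ g0 r c'

lemma rect_ie (g0 : List (List Int)) (r c : Nat) (hr : 1 ≤ r) (hc : 1 ≤ c) :
    rect g0 r c = pvGet2 g0 r c + rect g0 (r - 1) c + rect g0 r (c - 1)
      - rect g0 (r - 1) (c - 1) := by
  have h1 := rect_row g0 r c hr
  have h2 := rect_row g0 r (c - 1) hr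
  have h3 := rowp_col g0 r c hc
  linarith

-- rect as a horizontal prefix sum of vertical column sums (the value B's run accumulates)
lemma rect_as_colS (g0 : List (List Int)) (r c : Nat) :
    rect g0 r c = ∑ j ∈ Finset.range (c + 1), colS g0 (r + 1) j := by
  simp only [rect, rowp, colS]
  exact Finset.sum_comm

lemma colS_succ (g0 : List (List Int)) (r c : Nat) :
    colS g0 (r + 1) c = colS g0 r c + pvGet2 g0 r c := by
  simp [colS, Finset.sum_range_succ]

def ShapeInv (g0 g : List (List Int)) : Prop :=
  g.length = g0.length ∧ ∀ i, (g.getD i []).length = (g0.getD i []).length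

lemma shapeInv_pvSet2 (g0 g : List (List Int)) (r c : Nat) (v : Int)
    (h : ShapeInv g0 g) : ShapeInv g0 (pvSet2 g r c v) := by
  refine ⟨by simpa [pvSet2] using h.1, fun i => ?_⟩
  rw [rowlen_pvSet2]; exact h.2 i

def RowsOk (g0 : List (List Int)) : Prop :=
  ∀ i < g0.length, (g0.headD []).length ≤ (g0.getD i []).length

def InvA (g0 g : List (List Int)) (r c : Nat) : Prop :=
  ShapeInv g0 g ∧
  ∀ i j, i < g0.length → j < (g0.headD []).length →
    pvGet2 g i j = if i < r ∨ (i = r ∧ j < c) then rect g0 i j else pvGet2 g0 i j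

lemma stepA_inv (g0 g : List (List Int)) (hOk : RowsOk g0) (r c : Nat)
    (hr : r < g0.length) (hc : c < (g0.headD []).length)
    (h : InvA g0 g r c) : InvA g0 (aStep g r c) r (c + 1) := by
  obtain ⟨hsh, hcell⟩ := h
  refine ⟨shapeInv_pvSet2 _ _ _ _ _ hsh, fun i j hi hj => ?_⟩
  by_cases hij : i = r ∧ j = c
  · obtain ⟨rfl, rfl⟩ := hij
    have e0 : pvGet2 g i j = pvGet2 g0 i j := by
      rw [hcell i j hi hj]; exact if_neg (by omega)
    have e1 : 1 ≤ i → pvGet2 g (i - 1) j = rect g0 (i - 1) j := fun h1 => by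
      rw [hcell (i - 1) j (by omega) hj]; exact if_pos (by omega)
    have e2 : 1 ≤ j → pvGet2 g i (j - 1) = rect g0 i (j - 1) := fun h2 => by
      rw [hcell i (j - 1) hi (by omega)]; exact if_pos (by omega)
    have e3 : 1 ≤ i → 1 ≤ j → pvGet2 g (i - 1) (j - 1) = rect g0 (i - 1) (j - 1) :=
      fun h1 h2 => by
        rw [hcell (i - 1) (j - 1) (by omega) (by omega)]; exact if_pos (by omega)
    rw [aStep]
    rw [get2_pvSet2_same _ _ _ _ (by rw [hsh.1]; exact hi)
        (by rw [hsh.2]; exact lt_of_lt_of_le hj (hOk _ hi))]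
    rw [if_pos (show i < i ∨ (i = i ∧ j < j + 1) by omega)]
    rw [e0]
    by_cases h1 : 1 ≤ i <;> by_cases h2 : 1 ≤ j
    · rw [if_pos h1, if_pos h2, if_pos ⟨h1, h2⟩, e1 h1, e2 h2, e3 h1 h2,
        rect_ie g0 i j h1 h2]
    · rw [if_pos h1, if_neg h2, if_neg (by exact fun hx => h2 hx.2), e1 h1]
      have hj0 : j = 0 := by omega
      subst hj0
      rw [rect_row g0 i 0 h1, rowp_zero]; ring
    · rw [if_neg h1, if_pos h2, if_neg (by exact fun hx => h1 hx.1), e2 h2]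
      have hi0 : i = 0 := by omega
      subst hi0
      rw [show rect g0 0 (j - 1) = rowp g0 0 (j - 1) from rect_zero g0 (j - 1),
        show rect g0 0 j = rowp g0 0 j from rect_zero g0 j, rowp_col g0 0 j h2]
      ring
    · rw [if_neg h1, if_neg h2, if_neg (by exact fun hx => h1 hx.1)]
      have hi0 : i = 0 := by omega
      have hj0 : j = 0 := by omega
      subst hi0; subst hj0
      rw [rect_zero, rowp_zero]
  · have hne : i ≠ r ∨ j ≠ c := by omega
    rw [aStep, get2_pvSet2_ne _ _ _ _ _ _ hne, hcell i j hi hj]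
    exact if_congr (by omega) rfl rfl

lemma invA_init (g0 : List (List Int)) : InvA g0 g0 0 0 :=
  ⟨⟨rfl, fun _ => rfl⟩, fun i j _ _ => by rw [if_neg (by omega)]⟩

lemma invA_shift (g0 g : List (List Int)) (r : Nat)
    (h : InvA g0 g r (g0.headD []).length) : InvA g0 g (r + 1) 0 :=
  ⟨h.1, fun i j hi hj => by
    rw [h.2 i j hi hj]; exact if_congr (by omega) rfl rfl⟩

lemma passA (g0 : List (List Int)) (hOk : RowsOk g0) :
    InvA g0 ((List.range g0.length).foldl
      (fun g r => (List.range (g0.headD []).length).foldl (fun g c => aStep g r c) g) g0)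
      g0.length 0 := by
  simp only [List.range_eq_range']
  have := foldl_range'_inv
    (fun g r => (List.range' 0 (g0.headD []).length).foldl (fun g c => aStep g r c) g)
    (fun r g => InvA g0 g r 0) g0.length 0 g0
    (fun r g hr hr' hg => by
      apply invA_shift
      have := foldl_range'_inv (fun g c => aStep g r c) (fun c g => InvA g0 g r c)
        (g0.headD []).length 0 g
        (fun c g' hc hc' hg' => stepA_inv g0 g' hOk r c (by omega) (by omega) hg') hg
      simpa using this)
    (invA_init g0)
  simpa using this

-- ---- B-side lemmas: the colsum accumulator ----
lemma getD_set (l : List Int) (i j : Nat) (v : Int) :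
    (l.set i v).getD j 0 = if i = j ∧ i < l.length then v else l.getD j 0 := by
  simp only [List.getD_eq_getElem?_getD, List.getElem?_set]
  by_cases h : i = j
  · subst h
    by_cases hl : i < l.length
    · simp [hl]
    · simp [hl]
  · simp [h]

-- after the update loop, entry j (j < cols) gained pvGet2 g0 r j; length unchanged
lemma bUpdate_spec (g0 : List (List Int)) (r cols : Nat) (cs : List Int)
    (hlen : cs.length = cols) :
    (bUpdate g0 r cols cs).length = cols ∧
    ∀ j < cols, (bUpdate g0 r cols cs).getD j 0 = cs.getD j 0 + pvGet2 g0 r j := by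
  unfold bUpdate
  simp only [List.range_eq_range']
  have := foldl_range'_inv
    (fun cs c => cs.set c (cs.getD c 0 + pvGet2 g0 r c))
    (fun c b => b.length = cols ∧
      ∀ j < cols, b.getD j 0 = if j < c then cs.getD j 0 + pvGet2 g0 r j else cs.getD j 0)
    cols 0 cs
    (fun c b hc hc' hb => by
      obtain ⟨hbl, hbj⟩ := hb
      refine ⟨by simpa using hbl, fun j hj => ?_⟩
      rw [getD_set]
      by_cases hjc : j = c
      · subst hjc
        rw [if_pos ⟨rfl, by omega⟩, if_pos (by omega), hbj j hj, if_neg (by omega)]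
      · rw [if_neg (by omega), hbj j hj]
        exact if_congr (by omega) rfl rfl)
    (⟨hlen, fun j hj => by rw [if_neg (by omega)]⟩)
  simp only [Nat.zero_add] at this
  obtain ⟨h1, h2⟩ := this
  exact ⟨h1, fun j hj => by rw [h2 j hj, if_pos hj]⟩

-- B's break-terminated running-sum loop equals A's break-terminated loop over the prefix grid
lemma bRun_eq (g0 gA : List (List Int)) (cs : List Int) (r cols : Nat) (k : Int)
    (hcell : ∀ j < cols, pvGet2 gA r j = rect g0 r j)
    (hcs : ∀ j < cols, cs.getD j 0 = colS g0 (r + 1) j) :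
    ∀ (m s : Nat), s + m ≤ cols →
      ∀ run, run = ∑ j ∈ Finset.range s, colS g0 (r + 1) j →
      bRun cs k run (List.range' s m) = aCountRow gA r k (List.range' s m) := by
  intro m
  induction m with
  | zero => intro s _ run _; rfl
  | succ m ih =>
    intro s hs run hrun
    rw [List.range'_succ]
    rw [bRun, aCountRow]
    have hscols : s < cols := by omega
    have hrun' : run + cs.getD s 0 = rect g0 r s := by
      rw [hrun, hcs s hscols, rect_as_colS, Finset.sum_range_succ]
    rw [hcell s hscols, ← hrun']
    split_ifs with hk
    · rfl
    · rw [ih (s + 1) (by omega) (run + cs.getD s 0)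
        (by rw [hrun, Finset.sum_range_succ, hcs s hscols])]

theorem main_equiv (grid : List (List Int)) (k : Int)
    (hne : grid ≠ []) (hrows : ∀ row ∈ grid, (grid.headD []).length ≤ row.length) :
    countSubmatrices grid k = countSubmatrices_alt grid k := by
  have hOk : RowsOk grid := by
    intro i hi
    have : grid.getD i [] ∈ grid := by
      rw [List.getD_eq_getElem?_getD, List.getElem?_eq_getElem hi]
      exact List.getElem_mem hi
    exact hrows _ this
  have hA := passA grid hOk
  set cols := (grid.headD []).length with hcols
  set gA := (List.range grid.length).foldl
    (fun g r => (List.range cols).foldl (fun g c => aStep g r c) g) grid with hgA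
  rw [countSubmatrices, countSubmatrices_alt]
  simp only [← hcols, ← hgA]
  -- invariant over the main fold of B
  have hinv := foldl_range'_inv
    (fun (st : List Int × Int) r =>
      let cs := bUpdate grid r cols st.1
      (cs, st.2 + bRun cs k 0 (List.range cols)))
    (fun r st => st.1.length = cols ∧
      (∀ j < cols, st.1.getD j 0 = colS grid r j) ∧
      st.2 = (List.range' 0 r).foldl (fun count i => count + aCountRow gA i k (List.range cols)) 0)
    grid.length 0 (List.replicate cols (0 : Int), 0)
    (fun r st hr0 hr hst => by
      obtain ⟨hlen, hcs, hcnt⟩ := hst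
      obtain ⟨hlen', hcs'⟩ := bUpdate_spec grid r cols st.1 hlen
      have hcsr : ∀ j < cols, (bUpdate grid r cols st.1).getD j 0 = colS grid (r + 1) j := by
        intro j hj
        rw [hcs' j hj, hcs j hj, colS_succ]
      refine ⟨hlen', hcsr, ?_⟩
      have hrlt : r < grid.length := by omega
      have hcell : ∀ j < cols, pvGet2 gA r j = rect grid r j := by
        intro j hj
        rw [hA.2 r j hrlt hj]
        exact if_pos (Or.inl hrlt)
      have hb : bRun (bUpdate grid r cols st.1) k 0 (List.range cols)
          = aCountRow gA r k (List.range cols) := by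
        rw [List.range_eq_range']
        exact bRun_eq grid gA _ r cols k hcell hcsr cols 0 (by omega) 0 (by simp)
      simp only [List.range'_concat, List.foldl_append, List.foldl_cons, List.foldl_nil,
        Nat.zero_add, Nat.one_mul]
      simp only [hb, hcnt])
    (⟨List.length_replicate, fun j hj => by simp [colS], by simp⟩)
  simp only [Nat.zero_add, List.range_eq_range'] at hinv
  simp only [List.range_eq_range']
  rw [hinv.2.2]

-- ===== VERDICT (by name: the statement is the Claim_ definition above) =====
theorem countSubmatrices_spec : Claim_equal_countSubmatrices := by
  intro grid k _ hPre
  unfold Spec_countSubmatrices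
  exact main_equiv grid k hPre.1 hPre.2
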